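-- pv_equiv track=rewrite | github.com/pytervtr/My-advent-of-code-2020 | Day16/Day16.py | getPositionKeys
-- ===== SOURCE A (Python) =====
-- def getPositionKeys(ticket_fields:list, key_ranges:list):
--
-- 	matches:int = 0
-- 	correct_indexes:list = []
--
-- 	for index_row in range(len(ticket_fields)):
-- 		for index_column in range(len(ticket_fields[index_row])):
--
-- 			if [1 for range_pair in key_ranges if isInBound(range_pair, ticket_fields[index_row][index_column])]:
-- 				matches = matches +1
--
-- 			else:
-- 				break
--
-- 		if matches == len(ticket_fields[index_row]):
-- 			correct_indexes.append(index_row)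
--
-- 		matches = 0
--
-- 	return correct_indexes
--
-- def isInBound(ranges:list, value:int):
-- 	return (ranges[0]<=value and ranges[1]>=value)
-- ===== SOURCE B (Python) =====
-- def getPositionKeys(ticket_fields: list, key_ranges: list):
--     # Merge the ranges once into sorted disjoint intervals, then binary-search each value.
--     intervals = sorted(((r[0], r[1]) for r in key_ranges), key=lambda p: p[0])
--     merged = []
--     for lo, hi in intervals:
--         if merged and lo <= merged[-1][1] + 1:
--             if hi > merged[-1][1]:
--                 merged[-1] = (merged[-1][0], hi)
--         else:
--             merged.append((lo, hi))
--
--     def covered(v):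
--         lo_i, hi_i = 0, len(merged)
--         while lo_i < hi_i:
--             mid = (lo_i + hi_i) // 2
--             if merged[mid][0] <= v:
--                 lo_i = mid + 1
--             else:
--                 hi_i = mid
--         return lo_i > 0 and merged[lo_i - 1][1] >= v
--
--     return [i for i, row in enumerate(ticket_fields) if all(covered(v) for v in row)]
-- ===== Notes on version B (the rewrite author's own statement) =====
-- stated objective: faster
-- what changed: Instead of scanning all key ranges for every ticket value, B sorts the ranges once, merges them into disjoint intervals, and decides each value by binary search over the merged intervals.
-- outside the precondition, e.g. on getPositionKeys([[0]], [[5], [0, 1]]): A returns [0], B raises IndexError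
import Mathlib
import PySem

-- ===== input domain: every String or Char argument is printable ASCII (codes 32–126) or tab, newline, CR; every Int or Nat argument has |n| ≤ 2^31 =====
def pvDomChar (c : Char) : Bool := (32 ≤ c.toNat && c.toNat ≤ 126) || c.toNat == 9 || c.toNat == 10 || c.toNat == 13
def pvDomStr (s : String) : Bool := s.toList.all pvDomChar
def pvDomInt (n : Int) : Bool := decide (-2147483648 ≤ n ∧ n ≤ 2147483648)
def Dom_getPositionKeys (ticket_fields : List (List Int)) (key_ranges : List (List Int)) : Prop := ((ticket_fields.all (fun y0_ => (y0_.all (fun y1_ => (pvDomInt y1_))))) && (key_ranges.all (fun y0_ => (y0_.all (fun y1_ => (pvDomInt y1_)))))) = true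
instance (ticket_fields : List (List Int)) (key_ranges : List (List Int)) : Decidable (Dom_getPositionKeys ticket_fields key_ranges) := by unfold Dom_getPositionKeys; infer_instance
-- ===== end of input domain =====

-- B replaces A's per-value scan of all key ranges by sorted merged disjoint intervals queried by binary search (faster).
-- Pre_ excludes key_ranges containing an entry shorter than 2, on which A usually raises IndexError (and, when
-- short-circuiting lets A return, B itself raises while building the interval list).


-- ===== PORT A =====
def isInBound (ranges : List Int) (value : Int) : Bool :=
  decide ((PySem.List.pyGet? ranges 0).getD 0 ≤ value) &&
  decide ((PySem.List.pyGet? ranges 1).getD 0 ≥ value)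

-- inner 'for index_column …' loop with its break; 'matches' is the accumulator
def pvRowLoopA (key_ranges : List (List Int)) (row : List Int) (matches_ : Int) : Int :=
  match row with
  | [] => matches_
  | v :: rest =>
    if (key_ranges.filterMap (fun range_pair => if isInBound range_pair v then some (1 : Int) else none)) ≠ []
    then pvRowLoopA key_ranges rest (matches_ + 1)
    else matches_

-- outer 'for index_row …' loop; appends index_row when matches == len(row)
def pvRowsA (key_ranges : List (List Int)) (rows : List (List Int)) (index_row : Int)
    (correct_indexes : List Int) : List Int :=
  match rows with
  | [] => correct_indexes
  | row :: rest =>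
    let matches_ := pvRowLoopA key_ranges row 0
    pvRowsA key_ranges rest (index_row + 1)
      (if matches_ = (row.length : Int) then correct_indexes ++ [index_row] else correct_indexes)

def getPositionKeys (ticket_fields : List (List Int)) (key_ranges : List (List Int)) : List Int :=
  pvRowsA key_ranges ticket_fields 0 []

-- ===== PORT B =====
def pvPair (r : List Int) : Int × Int :=
  ((PySem.List.pyGet? r 0).getD 0, (PySem.List.pyGet? r 1).getD 0)

-- one step of B's merging loop (append / extend the last interval)
def pvMergeStep (merged : List (Int × Int)) (p : Int × Int) : List (Int × Int) :=
  match merged.getLast? with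
  | some lastp =>
    if p.1 ≤ lastp.2 + 1 then
      if p.2 > lastp.2 then merged.dropLast ++ [(lastp.1, p.2)] else merged
    else merged ++ [p]
  | none => merged ++ [p]

def pvMerged (key_ranges : List (List Int)) : List (Int × Int) :=
  (PySem.List.sorted (key_ranges.map pvPair) Prod.fst).foldl pvMergeStep []

-- B's hand-written binary-search loop (bisect_right on the interval left ends)
def pvBS (merged : List (Int × Int)) (v : Int) (lo hi : Nat) : Nat :=
  if _h : lo < hi then
    let mid := (lo + hi) / 2
    if (merged.getD mid (0, 0)).1 ≤ v then pvBS merged v (mid + 1) hi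
    else pvBS merged v lo mid
  else lo
termination_by hi - lo
decreasing_by all_goals omega

def pvCovered (merged : List (Int × Int)) (v : Int) : Bool :=
  let n := pvBS merged v 0 merged.length
  decide (0 < n) && decide ((merged.getD (n - 1) (0, 0)).2 ≥ v)

def getPositionKeys_alt (ticket_fields : List (List Int)) (key_ranges : List (List Int)) : List Int :=
  let merged := pvMerged key_ranges
  (PySem.List.enumerate ticket_fields 0).filterMap
    (fun p => if p.2.all (fun v => pvCovered merged v) then some p.1 else none)

-- ===== PRECONDITION & SPEC =====
-- Pre_ excludes key_ranges containing an entry shorter than 2: A raises IndexError there except when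
-- '<=' short-circuits, and B itself raises on every such input while unpacking (r[0], r[1]).
def Pre_getPositionKeys (ticket_fields : List (List Int)) (key_ranges : List (List Int)) : Prop :=
  ∀ r ∈ key_ranges, 2 ≤ r.length
instance (ticket_fields : List (List Int)) (key_ranges : List (List Int)) : Decidable (Pre_getPositionKeys ticket_fields key_ranges) := by unfold Pre_getPositionKeys; infer_instance
def pvWitness_getPositionKeys : List (List Int) × List (List Int) := ([[1], [5]], [[0, 3], [4, 6]])

def Spec_getPositionKeys (ticket_fields : List (List Int)) (key_ranges : List (List Int)) (out : List Int) : Prop := out = getPositionKeys_alt ticket_fields key_ranges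
instance (ticket_fields : List (List Int)) (key_ranges : List (List Int)) (out : List Int) : Decidable (Spec_getPositionKeys ticket_fields key_ranges out) := by unfold Spec_getPositionKeys; infer_instance

-- ===== CLAIM (what is proved, stated in full; the proofs are below) =====
def Claim_equal_getPositionKeys : Prop := ∀ (ticket_fields : List (List Int)) (key_ranges : List (List Int)), Dom_getPositionKeys ticket_fields key_ranges → Pre_getPositionKeys ticket_fields key_ranges → Spec_getPositionKeys ticket_fields key_ranges (getPositionKeys ticket_fields key_ranges)

-- ===== LEMMAS AND PROOFS =====

-- v lies in one of the intervals of l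
def pvCov (l : List (Int × Int)) (v : Int) : Prop := ∃ p ∈ l, p.1 ≤ v ∧ v ≤ p.2

-- merged-list invariant: left ends weakly increase and consecutive intervals leave a gap
def pvInv (l : List (Int × Int)) : Prop := l.Pairwise (fun x y => x.1 ≤ y.1 ∧ x.2 + 1 < y.1)

theorem pvMatch_iff (kr : List (List Int)) (v : Int) :
    ((kr.filterMap (fun rp => if isInBound rp v then some (1 : Int) else none)) ≠ []) ↔
      ∃ rp ∈ kr, isInBound rp v = true := by
  rw [Ne, List.filterMap_eq_nil_iff]
  push Not
  constructor
  · rintro ⟨rp, hm, hne⟩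
    refine ⟨rp, hm, ?_⟩
    by_contra h
    simp [h] at hne
  · rintro ⟨rp, hm, h⟩
    exact ⟨rp, hm, by simp [h]⟩

theorem pvRowLoopA_eq_len_iff' (kr : List (List Int)) (row : List Int) (m : Int) :
    pvRowLoopA kr row m = m + (row.length : Int) ↔ ∀ v ∈ row, ∃ rp ∈ kr, isInBound rp v = true := by
  induction row generalizing m with
  | nil => simp [pvRowLoopA]
  | cons v rest ih =>
    rw [pvRowLoopA]
    split
    · rename_i hc
      rw [pvMatch_iff] at hc
      have h2 := ih (m + 1)
      constructor
      · intro h w hw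
        rcases List.mem_cons.mp hw with h' | h'
        · subst h'; exact hc
        · refine (h2.mp ?_) w h'
          simp only [List.length_cons] at h; push_cast at h ⊢; omega
      · intro h
        have := h2.mpr (fun w hw => h w (List.mem_cons.mpr (Or.inr hw)))
        simp only [List.length_cons]; push_cast at this ⊢; omega
    · rename_i hc
      rw [pvMatch_iff] at hc
      constructor
      · intro h; exfalso
        simp only [List.length_cons] at h; push_cast at h
        have : (0:Int) ≤ rest.length := by positivity
        omega
      · intro h; exact absurd (h v (List.mem_cons_self)) hc

-- effect of one merge step, under "p's left end is ≥ every left end in acc"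
theorem pvMergeStep_spec (acc : List (Int × Int)) (p : Int × Int) (hinv : pvInv acc)
    (hle : ∀ x ∈ acc, x.1 ≤ p.1) :
    pvInv (pvMergeStep acc p) ∧
      (∀ x ∈ pvMergeStep acc p, x.1 ∈ acc.map Prod.fst ∨ x.1 = p.1) ∧
      (∀ v, pvCov (pvMergeStep acc p) v ↔ pvCov acc v ∨ (p.1 ≤ v ∧ v ≤ p.2)) := by
  rcases h : acc.getLast? with _ | lastp
  · -- acc = []
    have hnil : acc = [] := List.getLast?_eq_none_iff.mp h
    subst hnil
    simp [pvMergeStep, pvInv, pvCov]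
  · have hne : acc ≠ [] := by rintro rfl; simp at h
    have hdec : acc = acc.dropLast ++ [lastp] := by
      conv_lhs => rw [← List.dropLast_concat_getLast hne]
      have : acc.getLast hne = lastp := by
        have := List.getLast?_eq_some_getLast (l := acc) hne
        rw [h] at this; exact (Option.some_inj.mp this).symm
      rw [this]
    have hmem : lastp ∈ acc := List.mem_of_getLast? h
    have hinv' : (acc.dropLast).Pairwise (fun x y => x.1 ≤ y.1 ∧ x.2 + 1 < y.1) ∧
        ∀ x ∈ acc.dropLast, x.1 ≤ lastp.1 ∧ x.2 + 1 < lastp.1 := by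
      rw [pvInv] at hinv; rw [hdec] at hinv
      rw [List.pairwise_append] at hinv
      exact ⟨hinv.1, fun x hx => hinv.2.2 x hx lastp (by simp)⟩
    rw [pvMergeStep, h]
    simp only
    by_cases h1 : p.1 ≤ lastp.2 + 1
    · simp only [if_pos h1]
      by_cases h2 : p.2 > lastp.2
      · simp only [if_pos h2]
        refine ⟨?_, ?_, ?_⟩
        · rw [pvInv, List.pairwise_append]
          refine ⟨hinv'.1, by simp, ?_⟩
          intro x hx y hy
          simp at hy; subst hy
          exact hinv'.2 x hx
        · intro x hx
          rcases List.mem_append.mp hx with h' | h'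
          · exact Or.inl (List.mem_map_of_mem (by rw [hdec]; exact List.mem_append.mpr (Or.inl h')))
          · obtain rfl := List.mem_singleton.mp h'
            exact Or.inl (by simpa using List.mem_map_of_mem (f := Prod.fst) hmem)
        · intro v
          rw [pvCov, pvCov]
          constructor
          · rintro ⟨q, hq, hlo, hhi⟩
            rcases List.mem_append.mp hq with h' | h'
            · exact Or.inl ⟨q, by rw [hdec]; exact List.mem_append.mpr (Or.inl h'), hlo, hhi⟩
            · obtain rfl := List.mem_singleton.mp h'
              simp only at hlo hhi
              by_cases hv : v ≤ lastp.2
              · exact Or.inl ⟨lastp, hmem, hlo, hv⟩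
              · exact Or.inr ⟨by omega, hhi⟩
          · rintro (⟨q, hq, hlo, hhi⟩ | ⟨hlo, hhi⟩)
            · rw [hdec] at hq
              rcases List.mem_append.mp hq with h' | h'
              · exact ⟨q, List.mem_append.mpr (Or.inl h'), hlo, hhi⟩
              · rw [List.mem_singleton.mp h'] at hlo hhi
                exact ⟨(lastp.1, p.2), by simp, hlo, by simp only; omega⟩
            · refine ⟨(lastp.1, p.2), by simp, ?_, ?_⟩ <;> simp
              · have := hle lastp hmem; omega
              · omega
      · simp only [if_neg h2]
        refine ⟨hinv, fun x hx => Or.inl (List.mem_map_of_mem hx), ?_⟩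
        intro v
        constructor
        · exact Or.inl
        · rintro (hc | ⟨hlo, hhi⟩)
          · exact hc
          · exact ⟨lastp, hmem, by have := hle lastp hmem; omega, by omega⟩
    · simp only [if_neg h1]
      refine ⟨?_, ?_, ?_⟩
      · rw [pvInv, List.pairwise_append]
        refine ⟨hinv, by simp, ?_⟩
        intro x hx y hy
        simp at hy; subst hy
        constructor
        · exact hle x hx
        · rcases (by rw [hdec] at hx; exact List.mem_append.mp hx) with h' | h'
          · have := (hinv'.2 x h').2; have := hle lastp hmem; omega
          · simp at h'; subst h'; omega
      · intro x hx
        rcases List.mem_append.mp hx with h' | h'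
        · exact Or.inl (List.mem_map_of_mem h')
        · obtain rfl := List.mem_singleton.mp h'; exact Or.inr rfl
      · intro v
        rw [pvCov, pvCov]
        constructor
        · rintro ⟨q, hq, hlo, hhi⟩
          rcases List.mem_append.mp hq with h' | h'
          · exact Or.inl ⟨q, h', hlo, hhi⟩
          · obtain rfl := List.mem_singleton.mp h'; exact Or.inr ⟨hlo, hhi⟩
        · rintro (⟨q, hq, hlo, hhi⟩ | ⟨hlo, hhi⟩)
          · exact ⟨q, List.mem_append.mpr (Or.inl hq), hlo, hhi⟩
          · exact ⟨p, by simp, hlo, hhi⟩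

theorem pvMerge_inv (rest acc : List (Int × Int)) (hinv : pvInv acc)
    (hrest : rest.Pairwise (fun x y => x.1 ≤ y.1))
    (hbr : ∀ x ∈ acc, ∀ y ∈ rest, x.1 ≤ y.1) :
    pvInv (rest.foldl pvMergeStep acc) ∧
      (∀ v, pvCov (rest.foldl pvMergeStep acc) v ↔ pvCov acc v ∨ pvCov rest v) := by
  induction rest generalizing acc with
  | nil => exact ⟨hinv, fun v => by simp [pvCov]⟩
  | cons p rest ih =>
    have hstep := pvMergeStep_spec acc p hinv (fun x hx => hbr x hx p (by simp))
    rw [List.pairwise_cons] at hrest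
    have := ih (pvMergeStep acc p) hstep.1 hrest.2 (by
      intro x hx y hy
      rcases hstep.2.1 x hx with h' | h'
      · rcases List.mem_map.mp h' with ⟨q, hq, hq2⟩
        rw [← hq2]; exact hbr q hq y (List.mem_cons.mpr (Or.inr hy))
      · rw [h']; exact hrest.1 y hy)
    rw [List.foldl_cons]
    refine ⟨this.1, fun v => ?_⟩
    rw [this.2 v, hstep.2.2 v]
    constructor
    · rintro ((hc | hp) | hc)
      · exact Or.inl hc
      · exact Or.inr ⟨p, by simp, hp⟩
      · rcases hc with ⟨q, hq, hh⟩; exact Or.inr ⟨q, List.mem_cons.mpr (Or.inr hq), hh⟩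
    · rintro (hc | ⟨q, hq, hh⟩)
      · exact Or.inl (Or.inl hc)
      · rcases List.mem_cons.mp hq with h' | h'
        · subst h'; exact Or.inl (Or.inr hh)
        · exact Or.inr ⟨q, h', hh⟩

theorem pvBS_spec (merged : List (Int × Int)) (v : Int)
    (hmono : ∀ i j, (hi : i < merged.length) → (hj : j < merged.length) → i ≤ j → merged[i].1 ≤ merged[j].1) :
    ∀ lo hi, lo ≤ hi → hi ≤ merged.length →
      lo ≤ pvBS merged v lo hi ∧ pvBS merged v lo hi ≤ hi ∧
      (∀ i, lo ≤ i → i < pvBS merged v lo hi → (h : i < merged.length) → merged[i].1 ≤ v) ∧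
      (∀ i, pvBS merged v lo hi ≤ i → i < hi → (h : i < merged.length) → v < merged[i].1) := by
  intro lo hi
  induction lo, hi using pvBS.induct merged v with
  | case1 lo hi hlt mid hle ih =>
    intro h1 h2
    have hm : mid = (lo + hi) / 2 := rfl
    have hrw : pvBS merged v lo hi = pvBS merged v (mid + 1) hi := by
      conv_lhs => rw [pvBS]
      rw [dif_pos hlt, if_pos hle]
    rw [hrw]
    have hmid : lo ≤ mid ∧ mid < hi := by omega
    have hmidlen : mid < merged.length := by omega
    have hmv : merged[mid].1 ≤ v := by
      rw [List.getD_eq_getElem?_getD, List.getElem?_eq_getElem hmidlen] at hle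
      simpa using hle
    obtain ⟨a1, a2, a3, a4⟩ := ih (by omega) h2
    refine ⟨by omega, a2, ?_, a4⟩
    intro i hi1 hi2 hlen
    by_cases hc : mid + 1 ≤ i
    · exact a3 i hc hi2 hlen
    · exact le_trans (hmono i mid hlen hmidlen (by omega)) hmv
  | case2 lo hi hlt mid hle ih =>
    intro h1 h2
    have hm : mid = (lo + hi) / 2 := rfl
    have hrw : pvBS merged v lo hi = pvBS merged v lo mid := by
      conv_lhs => rw [pvBS]
      rw [dif_pos hlt, if_neg hle]
    rw [hrw]
    have hmid : lo ≤ mid ∧ mid < hi := by omega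
    have hmidlen : mid < merged.length := by omega
    have hmv : v < merged[mid].1 := by
      rw [List.getD_eq_getElem?_getD, List.getElem?_eq_getElem hmidlen] at hle
      simp only [Option.getD_some, not_le] at hle
      exact hle
    obtain ⟨a1, a2, a3, a4⟩ := ih (by omega) (by omega)
    refine ⟨a1, by omega, a3, ?_⟩
    intro i hi1 hi2 hlen
    by_cases hc : i < mid
    · exact a4 i hi1 hc hlen
    · exact lt_of_lt_of_le hmv (hmono mid i hmidlen hlen (by omega))
  | case3 lo hi hnlt =>
    intro h1 h2
    rw [pvBS, dif_neg hnlt]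
    exact ⟨le_refl _, by omega, by omega, by omega⟩

theorem pvCovered_iff (merged : List (Int × Int)) (v : Int) (hinv : pvInv merged) :
    pvCovered merged v = true ↔ pvCov merged v := by
  have hmono : ∀ i j, (hi : i < merged.length) → (hj : j < merged.length) → i ≤ j → merged[i].1 ≤ merged[j].1 := by
    intro i j hi hj hij
    rcases Nat.eq_or_lt_of_le hij with rfl | hlt
    · exact le_refl _
    · exact ((List.pairwise_iff_getElem.mp hinv) i j hi hj hlt).1
  obtain ⟨a1, a2, a3, a4⟩ := pvBS_spec merged v hmono 0 merged.length (Nat.zero_le _) (le_refl _)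
  set n := pvBS merged v 0 merged.length with hn
  rw [pvCovered]
  simp only [← hn, Bool.and_eq_true, decide_eq_true_eq]
  constructor
  · rintro ⟨hpos, hhi⟩
    have hlen : n - 1 < merged.length := by omega
    rw [List.getD_eq_getElem?_getD, List.getElem?_eq_getElem hlen] at hhi
    simp only [Option.getD_some] at hhi
    exact ⟨merged[n-1], List.getElem_mem _, a3 (n-1) (Nat.zero_le _) (by omega) hlen, hhi⟩
  · rintro ⟨q, hq, hlo, hhi⟩
    obtain ⟨j, hj, rfl⟩ := List.mem_iff_getElem.mp hq
    have hjn : j < n := by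
      by_contra hc
      exact absurd (a4 j (by omega) hj hj) (by omega)
    have hpos : 0 < n := by omega
    refine ⟨hpos, ?_⟩
    have hlen : n - 1 < merged.length := by omega
    rw [List.getD_eq_getElem?_getD, List.getElem?_eq_getElem hlen]
    simp only [Option.getD_some]
    rcases Nat.eq_or_lt_of_le (Nat.le_sub_one_of_lt hjn) with heq | hlt
    · have heq2 : merged[n-1]? = merged[j]? := by rw [show n - 1 = j from heq.symm]
      rw [List.getElem?_eq_getElem hlen, List.getElem?_eq_getElem hj] at heq2
      rw [Option.some_inj.mp heq2]
      exact hhi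
    · exfalso
      have hgap := ((List.pairwise_iff_getElem.mp hinv) j (j+1) hj (by omega) (by omega)).2
      have hle' : merged[j+1].1 ≤ merged[n-1].1 := hmono (j+1) (n-1) (by omega) hlen (by omega)
      have := a3 (n-1) (Nat.zero_le _) (by omega) hlen
      omega

theorem pvRowsA_eq (kr : List (List Int)) (rows : List (List Int)) (i : Int) (acc : List Int) :
    pvRowsA kr rows i acc = acc ++ (PySem.List.enumerate rows i).filterMap
      (fun p => if pvRowLoopA kr p.2 0 = (p.2.length : Int) then some p.1 else none) := by
  induction rows generalizing i acc with
  | nil => simp [pvRowsA, PySem.List.enumerate_nil]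
  | cons row rest ih =>
    rw [pvRowsA, PySem.List.enumerate_cons, List.filterMap_cons]
    simp only
    split
    · rw [ih]; simp
    · rw [ih]

theorem pvInBound_iff (rp : List Int) (v : Int) :
    isInBound rp v = true ↔ (pvPair rp).1 ≤ v ∧ v ≤ (pvPair rp).2 := by
  simp [isInBound, pvPair, ge_iff_le]

theorem pvMergedFacts (kr : List (List Int)) :
    pvInv (pvMerged kr) ∧ ∀ v, pvCov (pvMerged kr) v ↔ pvCov (kr.map pvPair) v := by
  have hp := PySem.List.sorted_pairwise (xs := kr.map pvPair) (key := Prod.fst)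
  obtain ⟨h1, h2⟩ := pvMerge_inv (PySem.List.sorted (kr.map pvPair) Prod.fst) []
    (by simp [pvInv]) hp (by simp)
  rw [pvMerged]
  refine ⟨h1, fun v => ?_⟩
  rw [h2 v]
  simp only [pvCov, PySem.List.mem_sorted]
  tauto

theorem pvRow_iff (kr : List (List Int)) (row : List Int) :
    (pvRowLoopA kr row 0 = (row.length : Int)) ↔
      (row.all (fun v => pvCovered (pvMerged kr) v) = true) := by
  obtain ⟨hinv, hcov⟩ := pvMergedFacts kr
  have h0 := pvRowLoopA_eq_len_iff' kr row 0
  rw [zero_add] at h0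
  rw [h0, List.all_eq_true]
  constructor
  · intro h v hv
    rw [pvCovered_iff _ _ hinv, hcov]
    obtain ⟨rp, hm, hb⟩ := h v hv
    exact ⟨pvPair rp, List.mem_map_of_mem hm, (pvInBound_iff rp v).mp hb⟩
  · intro h v hv
    have := h v hv
    rw [pvCovered_iff _ _ hinv, hcov] at this
    obtain ⟨q, hq, hb⟩ := this
    obtain ⟨rp, hm, rfl⟩ := List.mem_map.mp hq
    exact ⟨rp, hm, (pvInBound_iff rp v).mpr hb⟩

-- ===== VERDICT (by name: the statement is the Claim_ definition above) =====
theorem getPositionKeys_spec : Claim_equal_getPositionKeys := by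
  intro ticket_fields key_ranges _hdom _hpre
  show getPositionKeys ticket_fields key_ranges = getPositionKeys_alt ticket_fields key_ranges
  rw [getPositionKeys, pvRowsA_eq, List.nil_append]
  show _ = (PySem.List.enumerate ticket_fields 0).filterMap
    (fun p => if p.2.all (fun v => pvCovered (pvMerged key_ranges) v) then some p.1 else none)
  have hf : (fun (p : Int × List Int) =>
        if pvRowLoopA key_ranges p.2 0 = (p.2.length : Int) then some p.1 else none) =
      (fun (p : Int × List Int) =>
        if p.2.all (fun v => pvCovered (pvMerged key_ranges) v) then some p.1 else none) :=
    funext fun p => if_congr (pvRow_iff key_ranges p.2) rfl rfl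
  rw [hf]
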